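-- pv_equiv track=rewrite | github.com/Estrellajer/MM-FGVC | src/methods/base.py | _is_vision_backbone_module_name
-- ===== SOURCE A (Python) =====
-- def _is_vision_backbone_module_name(module_name: str) -> bool:
--     lowered = str(module_name).lower()
--     if lowered.startswith(("vision_model.", "vision_tower.", "vision_encoder.")):
--         return True
--     return any(
--         token in lowered
--         for token in (".vision_model.", ".vision_tower.", ".vision_encoder.")
--     )
-- ===== SOURCE B (Python) =====
-- _VISION_TOKENS = {"vision_model", "vision_tower", "vision_encoder"}
--
-- def _is_vision_backbone_module_name(module_name: str) -> bool:
--     parts = str(module_name).lower().split(".")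
--     return any(p in _VISION_TOKENS for p in parts[:-1])
-- ===== Notes on version B (the rewrite author's own statement) =====
-- stated objective: simpler
-- what changed: Replaces A's three startswith prefix checks plus three substring scans by a single tokenize pass: split the lowered name into dot-separated segments and test every segment except the last for membership in the three-token set.
import Mathlib
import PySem

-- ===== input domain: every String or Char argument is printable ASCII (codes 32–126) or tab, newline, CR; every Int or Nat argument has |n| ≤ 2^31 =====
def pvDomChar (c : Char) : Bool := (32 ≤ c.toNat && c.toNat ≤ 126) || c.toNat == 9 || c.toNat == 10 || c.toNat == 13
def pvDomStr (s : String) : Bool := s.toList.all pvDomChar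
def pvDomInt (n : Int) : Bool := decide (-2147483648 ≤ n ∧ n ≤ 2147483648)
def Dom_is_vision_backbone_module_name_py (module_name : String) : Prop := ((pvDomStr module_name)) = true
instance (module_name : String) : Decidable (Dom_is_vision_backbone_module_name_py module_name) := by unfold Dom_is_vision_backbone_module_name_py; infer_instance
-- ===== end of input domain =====

-- B replaces A's startswith-prefix checks plus substring scans by one split into dot-separated
-- segments and a set-membership test over every segment except the last (objective: simpler).

-- ===== PORT A =====
def is_vision_backbone_module_name_py (module_name : String) : Bool :=
  let lowered := PySem.Str.lower module_name
  if PySem.Str.startswith lowered "vision_model." ||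
     PySem.Str.startswith lowered "vision_tower." ||
     PySem.Str.startswith lowered "vision_encoder." then
    true
  else
    [".vision_model.", ".vision_tower.", ".vision_encoder."].any
      (fun token => PySem.Str.isIn token lowered)

-- ===== PORT B =====
def is_vision_backbone_module_name_py_alt (module_name : String) : Bool :=
  let parts := (PySem.Str.split? (PySem.Str.lower module_name) ".").getD []
  (PySem.List.slice parts none (some (-1))).any
    (fun p => p == "vision_model" || p == "vision_tower" || p == "vision_encoder")

-- ===== PRECONDITION & SPEC =====
def Spec_is_vision_backbone_module_name_py (module_name : String) (out : Bool) : Prop := out = is_vision_backbone_module_name_py_alt module_name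
instance (module_name : String) (out : Bool) : Decidable (Spec_is_vision_backbone_module_name_py module_name out) := by unfold Spec_is_vision_backbone_module_name_py; infer_instance

-- ===== CLAIM (what is proved, stated in full; the proofs are below) =====
def Claim_equal_is_vision_backbone_module_name_py : Prop := ∀ (module_name : String), Dom_is_vision_backbone_module_name_py module_name → Spec_is_vision_backbone_module_name_py module_name (is_vision_backbone_module_name_py module_name)

-- ===== LEMMAS AND PROOFS =====

-- The segments of l between '.' separators, in order (= l.split('.')).
def pvSegs : List Char → List (List Char)
  | [] => [[]]
  | c :: r =>
    if c = '.' then [] :: pvSegs r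
    else
      match pvSegs r with
      | [] => [[c]]
      | h :: tl => (c :: h) :: tl

lemma pvSegs_ne_nil (l : List Char) : pvSegs l ≠ [] := by
  cases l with
  | nil => simp [pvSegs]
  | cons c r =>
    simp only [pvSegs]
    split
    · simp
    · cases h : pvSegs r <;> simp

lemma pvGo_eq : ∀ (fuel : Nat) (l cur : List Char) (acc : List (List Char)),
    l.length ≤ fuel →
    PySem.Chars.splitOn.go ['.'] fuel l cur acc =
      acc.reverse ++ (cur.reverse ++ (pvSegs l).headI) :: (pvSegs l).tail := by
  intro fuel
  induction fuel with
  | zero =>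
    intro l cur acc h
    have hl : l = [] := by cases l with | nil => rfl | cons a b => simp at h
    subst hl
    simp [PySem.Chars.splitOn.go, pvSegs]
  | succ n ih =>
    intro l cur acc h
    cases l with
    | nil => simp [PySem.Chars.splitOn.go, pvSegs]
    | cons c rest =>
      by_cases hc : c = '.'
      · subst hc
        rw [PySem.Chars.splitOn.go]
        simp only [List.isPrefixOf, beq_self_eq_true, Bool.true_and, if_true, List.length_cons, List.drop_succ_cons, List.length_nil, List.drop_zero]
        rw [ih rest [] ((cur.reverse) :: acc) (by simpa using h)]
        obtain ⟨h₀, tl₀, hseg⟩ : ∃ h₀ tl₀, pvSegs rest = h₀ :: tl₀ := by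
          cases hs : pvSegs rest with
          | nil => exact absurd hs (pvSegs_ne_nil rest)
          | cons a b => exact ⟨a, b, rfl⟩
        simp [pvSegs, hseg]
      · rw [PySem.Chars.splitOn.go]
        have hpre : List.isPrefixOf ['.'] (c :: rest) = false := by
          simp [List.isPrefixOf]
          intro h'
          exact absurd h'.symm hc
        simp only [hpre, if_false, Bool.false_eq_true]
        rw [ih rest (c :: cur) acc (by simpa using h)]
        obtain ⟨h₀, tl₀, hseg⟩ : ∃ h₀ tl₀, pvSegs rest = h₀ :: tl₀ := by
          cases hs : pvSegs rest with
          | nil => exact absurd hs (pvSegs_ne_nil rest)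
          | cons a b => exact ⟨a, b, rfl⟩
        simp [pvSegs, hc, hseg]

lemma pvSplitOn_eq (l : List Char) : PySem.Chars.splitOn l ['.'] = pvSegs l := by
  rw [PySem.Chars.splitOn, pvGo_eq (l.length + 1) l [] [] (by omega)]
  obtain ⟨h₀, tl₀, hseg⟩ : ∃ h₀ tl₀, pvSegs l = h₀ :: tl₀ := by
    cases hs : pvSegs l with
    | nil => exact absurd hs (pvSegs_ne_nil l)
    | cons a b => exact ⟨a, b, rfl⟩
  simp [hseg]

-- head of pvSegs is the maximal dot-free prefix; the tail is empty iff there is no dot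
lemma pvSegs_head : ∀ l : List Char, ∃ tl, pvSegs l = (l.takeWhile (· ≠ '.')) :: tl ∧ (tl = [] ↔ '.' ∉ l) := by
  intro l
  induction l with
  | nil => exact ⟨[], by simp [pvSegs]⟩
  | cons c r ih =>
    obtain ⟨tl, hseg, hiff⟩ := ih
    by_cases hc : c = '.'
    · subst hc
      refine ⟨pvSegs r, ?_, ?_⟩
      · simp [pvSegs, List.takeWhile]
      · constructor
        · intro h; exact absurd h (pvSegs_ne_nil r)
        · intro h; exact absurd (by simp : '.' ∈ ('.' :: r)) h
    · refine ⟨tl, ?_, ?_⟩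
      · simp only [pvSegs, hc, if_false, hseg]
        simp [List.takeWhile, hc]
      · rw [hiff]
        simp [hc, Ne.symm hc]

-- t++['.'] is a prefix of r iff r contains a dot and t is exactly the dot-free prefix of r
lemma pvPref_iff : ∀ (t : List Char), '.' ∉ t → ∀ r : List Char,
    (t ++ ['.'] <+: r ↔ ('.' ∈ r ∧ t = r.takeWhile (· ≠ '.'))) := by
  intro t
  induction t with
  | nil =>
    intro _ r
    cases r with
    | nil => simp
    | cons c r' =>
      by_cases hc : c = '.'
      · subst hc; simp [List.takeWhile]
      · simp [List.cons_prefix_cons, List.takeWhile, hc, Ne.symm hc]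
  | cons a t' ih =>
    intro hd r
    have ha : a ≠ '.' := by intro h; exact hd (by simp [h])
    have hd' : '.' ∉ t' := fun h => hd (by simp [h])
    cases r with
    | nil => simp
    | cons c r' =>
      by_cases hc : c = '.'
      · subst hc
        simp [List.cons_prefix_cons, ha, List.takeWhile]
      · simp only [List.cons_append, List.cons_prefix_cons, ih hd' r', List.takeWhile]
        simp [hc, Ne.symm hc]
        tauto

-- occurrences of '.'++t++'.' in l are exactly the complete segments of l that are neither first nor last
lemma pvInfix_iff (t : List Char) (hd : '.' ∉ t) :
    ∀ l : List Char, (('.' :: (t ++ ['.'])) <:+: l ↔ t ∈ ((pvSegs l).dropLast).tail) := by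
  intro l
  induction l with
  | nil => simp [pvSegs]
  | cons c r ih =>
    obtain ⟨tl, hseg, hiff⟩ := pvSegs_head r
    rw [List.infix_cons_iff]
    by_cases hc : c = '.'
    · subst hc
      rw [List.cons_prefix_cons]
      simp only [true_and]
      have hs' : pvSegs ('.' :: r) = [] :: pvSegs r := by simp [pvSegs]
      have e1 : (pvSegs ('.' :: r)).dropLast.tail = (pvSegs r).dropLast := by
        rw [hs', List.dropLast_cons_of_ne_nil (pvSegs_ne_nil r), List.tail_cons]
      rw [e1, hseg, ih, hseg]
      cases tl with
      | nil =>
        have hnd : '.' ∉ r := hiff.mp rfl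
        have h1 : ¬ (t ++ ['.'] <+: r) := by
          rw [pvPref_iff t hd r]; tauto
        simp [h1]
      | cons b tl' =>
        have hmd : '.' ∈ r := by
          by_contra hn
          exact absurd (hiff.mpr hn) (by simp)
        rw [pvPref_iff t hd r]
        simp only [List.dropLast_cons_of_ne_nil (l := b :: tl') (show b :: tl' ≠ [] by simp),
          List.tail_cons, List.mem_cons, hmd, true_and]
    · have hnp : ¬ (('.' :: (t ++ ['.'])) <+: (c :: r)) := by
        rw [List.cons_prefix_cons]
        intro h
        exact hc h.1.symm
      simp only [hnp, false_or]
      rw [ih]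
      have hs' : pvSegs (c :: r) = (c :: r.takeWhile (· ≠ '.')) :: tl := by
        simp only [pvSegs, hc, if_false, hseg]
      rw [hs', hseg]
      cases tl with
      | nil => simp
      | cons b tl' =>
        simp only [List.dropLast_cons_of_ne_nil (l := b :: tl') (show b :: tl' ≠ [] by simp),
          List.tail_cons]

-- per-token: A's test (prefix or inner-substring) is membership of the token among the non-final segments
lemma pvToken_iff (t : List Char) (ht : t ≠ []) (hd : '.' ∉ t) (l : List Char) :
    ((t ++ ['.'] <+: l) ∨ (('.' :: (t ++ ['.'])) <:+: l)) ↔ t ∈ (pvSegs l).dropLast := by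
  have hmain := pvInfix_iff t hd ('.' :: l)
  rw [List.infix_cons_iff, List.cons_prefix_cons] at hmain
  obtain ⟨h₀, tl₀, hseg⟩ : ∃ h₀ tl₀, pvSegs l = h₀ :: tl₀ := by
    cases hs : pvSegs l with
    | nil => exact absurd hs (pvSegs_ne_nil l)
    | cons a b => exact ⟨a, b, rfl⟩
  have hs' : pvSegs ('.' :: l) = [] :: pvSegs l := by simp [pvSegs]
  rw [hs', hseg, List.dropLast_cons_of_ne_nil (by simp)] at hmain
  simp only [List.tail_cons, true_and] at hmain
  rw [← hseg] at hmain
  exact hmain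

lemma pvOfList_beq (a : List Char) (b : String) : (String.ofList a == b) = (a == b.toList) := by
  rw [Bool.eq_iff_iff]
  simp only [beq_iff_eq]
  constructor
  · rintro rfl; rw [String.toList_ofList]
  · rintro rfl; rw [String.ofList_toList]

lemma pvSlice_neg_one {α : Type} (xs : List α) : PySem.List.slice xs none (some (-1)) = xs.dropLast := by
  simp [PySem.List.slice, List.dropLast_eq_take]

-- ===== VERDICT (by name: the statement is the Claim_ definition above) =====
theorem is_vision_backbone_module_name_py_spec : Claim_equal_is_vision_backbone_module_name_py := by
  intro s _
  unfold Spec_is_vision_backbone_module_name_py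
  unfold is_vision_backbone_module_name_py is_vision_backbone_module_name_py_alt
  simp only [PySem.Str.split?, PySem.Chars.split?]
  have hdot : ("." : String).toList = ['.'] := by decide
  rw [hdot]
  simp only [List.isEmpty_cons, if_false, Option.map_some, Option.getD_some, Bool.false_eq_true]
  rw [pvSplitOn_eq, pvSlice_neg_one, ← List.map_dropLast, List.any_map]
  simp only [Function.comp_def, pvOfList_beq]
  set l := (PySem.Str.lower s).toList with hl
  simp only [PySem.Str.startswith_eq, PySem.Str.isIn_eq, List.any_cons, List.any_nil,
    Bool.or_false, ← hl]
  have e1 : ("vision_model." : String).toList = "vision_model".toList ++ ['.'] := by decide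
  have e2 : ("vision_tower." : String).toList = "vision_tower".toList ++ ['.'] := by decide
  have e3 : ("vision_encoder." : String).toList = "vision_encoder".toList ++ ['.'] := by decide
  have d1 : (".vision_model." : String).toList = '.' :: ("vision_model".toList ++ ['.']) := by decide
  have d2 : (".vision_tower." : String).toList = '.' :: ("vision_tower".toList ++ ['.']) := by decide
  have d3 : (".vision_encoder." : String).toList = '.' :: ("vision_encoder".toList ++ ['.']) := by decide
  have k1 := pvToken_iff "vision_model".toList (by decide) (by decide) l
  have k2 := pvToken_iff "vision_tower".toList (by decide) (by decide) l
  have k3 := pvToken_iff "vision_encoder".toList (by decide) (by decide) l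
  rw [Bool.eq_iff_iff]
  simp only [e1, e2, e3, d1, d2, d3]
  by_cases hcond : (PySem.Chars.startswith l ("vision_model".toList ++ ['.']) ||
      PySem.Chars.startswith l ("vision_tower".toList ++ ['.']) ||
      PySem.Chars.startswith l ("vision_encoder".toList ++ ['.'])) = true
  · rw [if_pos hcond]
    simp only [Bool.or_eq_true, PySem.Chars.startswith_iff] at hcond
    simp only [List.any_eq_true, beq_iff_eq, Bool.or_eq_true, true_iff]
    rcases hcond with (h | h) | h
    · exact ⟨_, k1.mp (Or.inl h), Or.inl (Or.inl rfl)⟩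
    · exact ⟨_, k2.mp (Or.inl h), Or.inl (Or.inr rfl)⟩
    · exact ⟨_, k3.mp (Or.inl h), Or.inr rfl⟩
  · rw [if_neg hcond]
    simp only [Bool.or_eq_true, PySem.Chars.startswith_iff, not_or] at hcond
    simp only [Bool.or_eq_true, PySem.Chars.isIn_iff_infix, List.any_eq_true, beq_iff_eq]
    constructor
    · rintro (h | h | h)
      · exact ⟨_, k1.mp (Or.inr h), Or.inl (Or.inl rfl)⟩
      · exact ⟨_, k2.mp (Or.inr h), Or.inl (Or.inr rfl)⟩
      · exact ⟨_, k3.mp (Or.inr h), Or.inr rfl⟩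
    · rintro ⟨x, hx, (rfl | rfl) | rfl⟩
      · rcases k1.mpr hx with h | h
        · exact absurd h hcond.1.1
        · exact Or.inl h
      · rcases k2.mpr hx with h | h
        · exact absurd h hcond.1.2
        · exact Or.inr (Or.inl h)
      · rcases k3.mpr hx with h | h
        · exact absurd h hcond.2
        · exact Or.inr (Or.inr h)
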